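-- pv_equiv track=rewrite | github.com/coding-armadillo/kattis | src/easy/pikemaneasy.py | f
-- ===== SOURCE A (Python) =====
-- def f(n, time, l):
--     total_time, penalty = 0, 0
--     for i, t in enumerate(sorted(l)):
--         if total_time + t > time:
--             return i, penalty
--         total_time += t
--         penalty = (penalty + total_time) % 1_000_000_007
--     return n, penalty
-- ===== SOURCE B (Python) =====
-- def f(n, time, l):
--     P = 1_000_000_007
--     # phase 1: prefix-sum table of the sorted times
--     prefix = []
--     s = 0
--     for t in sorted(l):
--         s += t
--         prefix.append(s)
--     # phase 2: count of leading prefix sums within the budget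
--     count = 0
--     for s in prefix:
--         if s > time:
--             break
--         count += 1
--     # phase 3: penalty = sum of those prefix sums, one mod at the end
--     if count == len(prefix):
--         return n, sum(prefix) % P
--     return count, sum(prefix[:count]) % P
-- ===== Notes on version B (the rewrite author's own statement) =====
-- stated objective: alternative
-- what changed: B separates the work into three phases - build the full prefix-sum table of sorted(l), count the leading entries <= time by a scan of the table, and compute the penalty as one sum of that slice with a single final mod - instead of A's single interleaved loop with a running total, per-step modular penalty update and early return.
import Mathlib
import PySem

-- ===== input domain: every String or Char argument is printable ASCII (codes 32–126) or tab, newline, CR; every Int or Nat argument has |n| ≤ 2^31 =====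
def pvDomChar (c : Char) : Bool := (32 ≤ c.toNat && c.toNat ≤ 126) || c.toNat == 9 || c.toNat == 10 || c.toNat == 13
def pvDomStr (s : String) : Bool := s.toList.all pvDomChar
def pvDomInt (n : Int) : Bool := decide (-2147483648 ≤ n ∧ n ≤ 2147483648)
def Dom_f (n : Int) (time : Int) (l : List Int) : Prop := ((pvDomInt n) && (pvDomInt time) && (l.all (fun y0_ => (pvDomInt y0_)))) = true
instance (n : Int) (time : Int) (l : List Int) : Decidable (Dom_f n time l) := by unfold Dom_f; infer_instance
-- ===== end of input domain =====

-- B builds the full prefix-sum table of sorted(l), counts the leading entries ≤ time by a scan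
-- of the table, and takes one sum of that slice with a single final mod, instead of A's single
-- interleaved loop with running total, per-step modular penalty update and early return.

-- ===== PORT A =====
-- loop over enumerate(sorted(l)) with early return
def fGo (n : Int) (time : Int) : List Int → Int → Int → Int → Int × Int
  | [], _, _, penalty => (n, penalty)
  | t :: rest, i, total, penalty =>
    if total + t > time then (i, penalty)
    else fGo n time rest (i + 1) (total + t)
           (PySem.Int.mod (penalty + (total + t)) 1000000007)

def f (n : Int) (time : Int) (l : List Int) : Int × Int :=
  fGo n time (PySem.List.sorted l (fun x => x) false) 0 0 0

-- ===== PORT B =====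
-- phase 1: prefix-sum table (running sum s)
def prefixSums : List Int → Int → List Int
  | [], _ => []
  | t :: rest, s => (s + t) :: prefixSums rest (s + t)

-- phase 2: count of leading table entries ≤ time (loop with break)
def countLe (time : Int) : List Int → Nat
  | [] => 0
  | s :: rest => if s > time then 0 else countLe time rest + 1

def f_alt (n : Int) (time : Int) (l : List Int) : Int × Int :=
  let pfx := prefixSums (PySem.List.sorted l (fun x => x) false) 0
  let count := countLe time pfx
  if count = pfx.length then (n, PySem.Int.mod pfx.sum 1000000007)
  else ((count : Int), PySem.Int.mod (pfx.take count).sum 1000000007)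

-- ===== PRECONDITION & SPEC =====
def Spec_f (n : Int) (time : Int) (l : List Int) (out : Int × Int) : Prop := out = f_alt n time l
instance (n : Int) (time : Int) (l : List Int) (out : Int × Int) : Decidable (Spec_f n time l out) := by unfold Spec_f; infer_instance

-- ===== CLAIM (what is proved, stated in full; the proofs are below) =====
def Claim_equal_f : Prop := ∀ (n : Int) (time : Int) (l : List Int), Dom_f n time l → Spec_f n time l (f n time l)

-- ===== LEMMAS AND PROOFS =====

-- A's per-step modular penalty accumulation, as a fold over the prefix sums
def modFold (p : Int) (xs : List Int) : Int :=
  xs.foldl (fun a s => PySem.Int.mod (a + s) 1000000007) p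

theorem modFold_nil (p : Int) : modFold p [] = p := rfl
theorem modFold_cons (p s : Int) (xs : List Int) :
    modFold p (s :: xs) = modFold (PySem.Int.mod (p + s) 1000000007) xs := rfl

-- iterated mod = one mod of the sum
theorem modFold_mod (xs : List Int) : ∀ p : Int,
    modFold (PySem.Int.mod p 1000000007) xs = PySem.Int.mod (p + xs.sum) 1000000007 := by
  induction xs with
  | nil => intro p; simp [modFold_nil]
  | cons s rest ih =>
    intro p
    rw [modFold_cons]
    have hmod : ∀ a : Int, PySem.Int.mod a 1000000007 = a % 1000000007 := fun a =>
      PySem.Int.mod_eq_emod_of_pos (by norm_num : (0:Int) < 1000000007)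
    have : PySem.Int.mod (PySem.Int.mod p 1000000007 + s) 1000000007
         = PySem.Int.mod (p + s) 1000000007 := by
      simp [Int.emod_add_emod]
    rw [this, ih (p + s)]
    simp [List.sum_cons]; ring_nf

-- main loop characterisation: fGo against the phase-separated form
theorem fGo_eq (n time : Int) : ∀ (xs : List Int) (i total p : Int),
    fGo n time xs i total p =
      (let pre := prefixSums xs total
       let c := countLe time pre
       if c = pre.length then (n, modFold p pre)
       else (i + (c : Int), modFold p (pre.take c))) := by
  intro xs
  induction xs with
  | nil => intro i total p; simp [fGo, prefixSums, countLe, modFold_nil]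
  | cons t rest ih =>
    intro i total p
    simp only [fGo, prefixSums, countLe]
    by_cases h : total + t > time
    · simp [h, modFold_nil]
    · have hle : ¬ (total + t > time) := h
      simp only [hle, if_false]
      rw [ih (i + 1) (total + t) (PySem.Int.mod (p + (total + t)) 1000000007)]
      simp only []
      by_cases hc : countLe time (prefixSums rest (total + t)) = (prefixSums rest (total + t)).length
      · simp [hc, modFold_cons]
      · have hne : ¬ (countLe time (prefixSums rest (total + t)) + 1
              = (prefixSums rest (total + t)).length + 1) := by omega
        simp [hc, modFold_cons]
        omega

theorem f_spec : Claim_equal_f := by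
  intro n time l _
  unfold Spec_f f f_alt
  rw [fGo_eq]
  simp only []
  set pre := prefixSums (PySem.List.sorted l (fun x => x) false) 0 with hpre
  have h0 : (0 : Int) = PySem.Int.mod 0 1000000007 := by
    rw [PySem.Int.mod_eq_emod_of_pos (by norm_num : (0:Int) < 1000000007)]; rfl
  by_cases hc : countLe time pre = pre.length
  · simp [hc]
    rw [h0, modFold_mod]
    simp
  · simp [hc]
    rw [h0, modFold_mod]
    simp
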